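-- pv_equiv track=rewrite | github.com/yugen-ok/AiRT | usage_examples/enron/preprocess.py | collapse_repeated_chars
-- ===== SOURCE A (Python) =====
-- def collapse_repeated_chars(s: str) -> str:
--     result = []
--
--     prev_class = None
--     repeat_count = 0
--
--     for ch in s:
--         # classify character
--         if ch.isdigit():
--             char_class = ("digit", ch)
--         elif ch == "\n":
--             char_class = ("newline", None)
--         elif ch.isspace():
--             char_class = ("hspace", None)
--         else:
--             char_class = ("char", ch)
--
--         # repetition logic (class-based)
--         if char_class == prev_class:
--             repeat_count += 1
--         else:
--             prev_class = char_class
--             repeat_count = 1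
--
--         # emit logic
--         if char_class[0] == "digit":
--             result.append(ch)
--
--         elif char_class[0] == "newline":
--             if repeat_count <= 2:
--                 result.append("\n")
--
--         elif char_class[0] == "hspace":
--             if repeat_count == 1:
--                 result.append(" ")
--
--         else:  # other non-digit chars
--             if repeat_count <= 3:
--                 result.append(ch)
--
--     return "".join(result)
-- ===== SOURCE B (Python) =====
-- def collapse_repeated_chars(s: str) -> str:
--     def classify(ch):
--         if ch.isdigit():
--             return ("digit", ch)
--         elif ch == "\n":
--             return ("newline", None)
--         elif ch.isspace():
--             return ("hspace", None)
--         else: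
--             return ("char", ch)
--
--     out = []
--     i, n = 0, len(s)
--     while i < n:
--         key = classify(s[i])
--         j = i + 1
--         while j < n and classify(s[j]) == key:
--             j += 1
--         m = j - i
--         cls, payload = key
--         if cls == "digit":
--             out.append(payload * m)
--         elif cls == "newline":
--             out.append("\n" * min(m, 2))
--         elif cls == "hspace":
--             out.append(" ")
--         else:
--             out.append(payload * min(m, 3))
--         i = j
--     return "".join(out)
-- ===== Notes on version B (the rewrite author's own statement) =====
-- stated objective: simpler
-- what changed: Replaces A's per-character state machine (prev_class/repeat_count carried through every iteration) by a run-based scan that splits off each maximal run of one character class and emits its whole output in closed form (run chars for digits, min(len,2) newlines, one space, min(len,3) chars).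
import Mathlib
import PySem

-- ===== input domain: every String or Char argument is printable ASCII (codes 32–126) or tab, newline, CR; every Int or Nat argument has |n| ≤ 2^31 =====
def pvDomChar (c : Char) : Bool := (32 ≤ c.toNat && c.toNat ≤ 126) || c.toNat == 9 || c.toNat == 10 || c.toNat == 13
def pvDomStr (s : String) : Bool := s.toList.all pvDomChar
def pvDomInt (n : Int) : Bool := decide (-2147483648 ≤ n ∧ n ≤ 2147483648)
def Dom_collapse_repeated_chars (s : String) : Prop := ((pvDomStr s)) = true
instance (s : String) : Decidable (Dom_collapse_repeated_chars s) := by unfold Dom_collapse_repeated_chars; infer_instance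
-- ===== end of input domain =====

-- B replaces A's per-character state machine by a run-based scan (split off each maximal run of
-- one character class, emit its output in closed form); objective: simpler decomposition, same cost.

-- The `("class", payload)` tuple both Pythons compute for a character
-- (A builds this if-chain inline in its loop; B has it as the helper `classify`).
def pvClassify (ch : Char) : String × Option Char :=
  if PySem.Chars.isdigit ch then ("digit", some ch)
  else if ch = '\n' then ("newline", none)
  else if PySem.Chars.isspace ch then ("hspace", none)
  else ("char", some ch)

-- ===== PORT A =====
-- A's loop body: state (result, prev_class, repeat_count); repeat_count is a Nat counter
-- (Python's int stays ≥ 0 here: it is only ever set to 1 or incremented).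
def pvStepA (st : List Char × Option (String × Option Char) × Nat) (ch : Char) :
    List Char × Option (String × Option Char) × Nat :=
  let result := st.1
  let prev_class := st.2.1
  let repeat_count := st.2.2
  let char_class := pvClassify ch
  let repeat_count' := if some char_class = prev_class then repeat_count + 1 else 1
  let prev_class' := if some char_class = prev_class then prev_class else some char_class
  let result' :=
    if char_class.1 = "digit" then result ++ [ch]
    else if char_class.1 = "newline" then
      (if repeat_count' ≤ 2 then result ++ ['\n'] else result)
    else if char_class.1 = "hspace" then
      (if repeat_count' = 1 then result ++ [' '] else result)
    else
      (if repeat_count' ≤ 3 then result ++ [ch] else result)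
  (result', prev_class', repeat_count')

def collapse_repeated_chars (s : String) : String :=
  String.ofList (s.toList.foldl pvStepA ([], none, 0)).1

-- ===== PORT B =====
-- Port of B: split off the maximal run of the head's class (B's inner index scan, as
-- takeWhile/dropWhile), emit that run's output in closed form, recurse on the rest.
def pvAltGo : List Char → List Char
  | [] => []
  | c :: cs =>
    let key := pvClassify c
    let m := 1 + (cs.takeWhile (fun d => pvClassify d == key)).length
    let emitted :=
      if key.1 = "digit" then List.replicate m (key.2.getD ' ')
      else if key.1 = "newline" then List.replicate (min m 2) '\n'
      else if key.1 = "hspace" then [' ']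
      else List.replicate (min m 3) (key.2.getD ' ')
    emitted ++ pvAltGo (cs.dropWhile (fun d => pvClassify d == key))
  termination_by cs => cs.length
  decreasing_by
    exact Nat.lt_succ_of_le (List.length_dropWhile_le _ _)

def collapse_repeated_chars_alt (s : String) : String :=
  String.ofList (pvAltGo s.toList)

-- ===== PRECONDITION & SPEC =====
def Spec_collapse_repeated_chars (s : String) (out : String) : Prop := out = collapse_repeated_chars_alt s
instance (s : String) (out : String) : Decidable (Spec_collapse_repeated_chars s out) := by unfold Spec_collapse_repeated_chars; infer_instance

-- ===== CLAIM (what is proved, stated in full; the proofs are below) =====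
def Claim_equal_collapse_repeated_chars : Prop := ∀ (s : String), Dom_collapse_repeated_chars s → Spec_collapse_repeated_chars s (collapse_repeated_chars s)

-- ===== LEMMAS AND PROOFS =====

-- What A's loop body appends for one character of class `k` seen with repeat count `cnt`.
def pvStepEmit (k : String × Option Char) (cnt : Nat) (ch : Char) : List Char :=
  if k.1 = "digit" then [ch]
  else if k.1 = "newline" then (if cnt ≤ 2 then ['\n'] else [])
  else if k.1 = "hspace" then (if cnt = 1 then [' '] else [])
  else (if cnt ≤ 3 then [ch] else [])

theorem pvStepA_eq (res : List Char) (prev : Option (String × Option Char)) (cnt : Nat)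
    (ch : Char) :
    pvStepA (res, prev, cnt) ch =
      (res ++ pvStepEmit (pvClassify ch) (if some (pvClassify ch) = prev then cnt + 1 else 1) ch,
       some (pvClassify ch),
       if some (pvClassify ch) = prev then cnt + 1 else 1) := by
  unfold pvStepA pvStepEmit
  split_ifs <;> simp_all

-- A's loop, emission-style: the characters A appends from state (prev, cnt) onwards.
def pvLoopA : List Char → Option (String × Option Char) → Nat → List Char
  | [], _, _ => []
  | ch :: cs, prev, cnt =>
    let cc := pvClassify ch
    let cnt' := if some cc = prev then cnt + 1 else 1
    pvStepEmit cc cnt' ch ++ pvLoopA cs (some cc) cnt'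

-- What A emits along a segment all of class k, with repeat counts cnt+1, cnt+2, …
def pvEmitSeg (k : String × Option Char) : Nat → List Char → List Char
  | _, [] => []
  | cnt, x :: t => pvStepEmit k (cnt + 1) x ++ pvEmitSeg k (cnt + 1) t

theorem pvFoldA_eq_loopA (cs : List Char) :
    ∀ (res : List Char) (prev : Option (String × Option Char)) (cnt : Nat),
    (cs.foldl pvStepA (res, prev, cnt)).1 = res ++ pvLoopA cs prev cnt := by
  induction cs with
  | nil => intro res prev cnt; simp [pvLoopA]
  | cons ch cs ih =>
    intro res prev cnt
    simp only [List.foldl_cons, pvStepA_eq, ih, pvLoopA, List.append_assoc]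

theorem pvLoopA_reset (d : List Char) (k : String × Option Char) (n : Nat)
    (hd : ∀ x xs, d = x :: xs → pvClassify x ≠ k) :
    pvLoopA d (some k) n = pvLoopA d none 0 := by
  cases d with
  | nil => rfl
  | cons x xs =>
    have hne : pvClassify x ≠ k := hd x xs rfl
    simp [pvLoopA, hne]

theorem pvLoopA_seg (k : String × Option Char) (t : List Char)
    (h : ∀ x ∈ t, pvClassify x = k) :
    ∀ (n : Nat) (d : List Char),
    pvLoopA (t ++ d) (some k) n = pvEmitSeg k n t ++ pvLoopA d (some k) (n + t.length) := by
  induction t with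
  | nil => intro n d; simp [pvEmitSeg]
  | cons x t ih =>
    intro n d
    have hx : pvClassify x = k := h x (List.mem_cons_self ..)
    have hlen : n + (x :: t).length = (n + 1) + t.length := by
      simp only [List.length_cons]; omega
    rw [hlen]
    simp only [List.cons_append, pvLoopA, pvEmitSeg, hx, if_true, List.append_assoc]
    rw [ih (fun y hy => h y (List.mem_cons_of_mem _ hy)) (n + 1) d]

-- payload inversion: the classifier only puts the character itself in the payload slot
theorem pvClassify_snd (x : Char) (s : String) (p : Char)
    (h : pvClassify x = (s, some p)) : x = p := by
  unfold pvClassify at h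
  split_ifs at h <;> simp_all

-- per-class reductions of pvStepEmit
theorem pvStepEmit_newline (o : Option Char) (cnt : Nat) (ch : Char) :
    pvStepEmit ("newline", o) cnt ch = if cnt ≤ 2 then ['\n'] else [] := by
  simp [pvStepEmit]

theorem pvStepEmit_hspace (o : Option Char) (cnt : Nat) (ch : Char) :
    pvStepEmit ("hspace", o) cnt ch = if cnt = 1 then [' '] else [] := by
  simp [pvStepEmit]

theorem pvStepEmit_char (o : Option Char) (cnt : Nat) (ch : Char) :
    pvStepEmit ("char", o) cnt ch = if cnt ≤ 3 then [ch] else [] := by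
  simp [pvStepEmit]

-- closed forms of pvEmitSeg per class
theorem pvEmitSeg_digit (p : Char) (t : List Char)
    (h : ∀ x ∈ t, pvClassify x = ("digit", some p)) (n : Nat) :
    pvEmitSeg ("digit", some p) n t = List.replicate t.length p := by
  induction t generalizing n with
  | nil => rfl
  | cons x t ih =>
    have hx : x = p := pvClassify_snd x _ p (h x (List.mem_cons_self ..))
    simp [pvEmitSeg, pvStepEmit, hx, List.replicate_succ,
      ih (fun y hy => h y (List.mem_cons_of_mem _ hy))]

theorem pvEmitSeg_newline (t : List Char) (n : Nat) :
    pvEmitSeg ("newline", (none : Option Char)) n t = List.replicate (min t.length (2 - n)) '\n' := by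
  induction t generalizing n with
  | nil => simp [pvEmitSeg]
  | cons x t ih =>
    simp only [pvEmitSeg, pvStepEmit_newline, ih (n + 1)]
    by_cases h1 : n + 1 ≤ 2
    · rw [if_pos h1]
      have he : min (x :: t).length (2 - n) = min t.length (2 - (n + 1)) + 1 := by
        simp only [List.length_cons]; omega
      rw [he, List.replicate_succ]; rfl
    · rw [if_neg h1]
      have he : min (x :: t).length (2 - n) = min t.length (2 - (n + 1)) := by
        simp only [List.length_cons]; omega
      rw [he, List.nil_append]

theorem pvEmitSeg_hspace (t : List Char) (n : Nat) :
    pvEmitSeg ("hspace", (none : Option Char)) n t = List.replicate (min t.length (1 - n)) ' ' := by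
  induction t generalizing n with
  | nil => simp [pvEmitSeg]
  | cons x t ih =>
    simp only [pvEmitSeg, pvStepEmit_hspace, ih (n + 1)]
    by_cases h1 : n + 1 = 1
    · rw [if_pos h1]
      have he : min (x :: t).length (1 - n) = min t.length (1 - (n + 1)) + 1 := by
        simp only [List.length_cons]; omega
      rw [he, List.replicate_succ]; rfl
    · rw [if_neg h1]
      have he : min (x :: t).length (1 - n) = min t.length (1 - (n + 1)) := by
        simp only [List.length_cons]; omega
      rw [he, List.nil_append]

theorem pvEmitSeg_char (p : Char) (t : List Char)
    (h : ∀ x ∈ t, pvClassify x = ("char", some p)) (n : Nat) :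
    pvEmitSeg ("char", some p) n t = List.replicate (min t.length (3 - n)) p := by
  induction t generalizing n with
  | nil => simp [pvEmitSeg]
  | cons x t ih =>
    have hx : x = p := pvClassify_snd x _ p (h x (List.mem_cons_self ..))
    simp only [pvEmitSeg, pvStepEmit_char, ih (fun y hy => h y (List.mem_cons_of_mem _ hy)) (n + 1)]
    by_cases h1 : n + 1 ≤ 3
    · rw [if_pos h1]
      have he : min (x :: t).length (3 - n) = min t.length (3 - (n + 1)) + 1 := by
        simp only [List.length_cons]; omega
      rw [he, List.replicate_succ, hx]; rfl
    · rw [if_neg h1]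
      have he : min (x :: t).length (3 - n) = min t.length (3 - (n + 1)) := by
        simp only [List.length_cons]; omega
      rw [he, List.nil_append]

theorem pv_dropWhile_head_false (p : Char → Bool) (l : List Char) (x : Char) (xs : List Char)
    (h : l.dropWhile p = x :: xs) : p x = false := by
  have h2 := List.head_dropWhile_not p (l := l) (by rw [h]; simp)
  simp only [h, List.head_cons] at h2; exact h2

theorem pvLoopA_eq_alt : ∀ (n : Nat) (cs : List Char), cs.length ≤ n →
    pvLoopA cs none 0 = pvAltGo cs := by
  intro n
  induction n with
  | zero =>
    intro cs h
    have : cs = [] := List.eq_nil_of_length_eq_zero (Nat.le_zero.mp h)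
    subst this; simp [pvLoopA, pvAltGo]
  | succ n ih =>
    intro cs h
    cases cs with
    | nil => simp [pvLoopA, pvAltGo]
    | cons c cs' =>
      set p := fun d => pvClassify d == pvClassify c with hp
      set t := cs'.takeWhile p with htdef
      set r := cs'.dropWhile p with hrdef
      have hsplit : t ++ r = cs' := List.takeWhile_append_dropWhile
      have ht : ∀ x ∈ t, pvClassify x = pvClassify c := by
        intro x hx
        have := List.mem_takeWhile_imp hx
        rw [hp] at this; simpa using this
      have hd : ∀ x xs, r = x :: xs → pvClassify x ≠ pvClassify c := by
        intro x xs hx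
        have hx' : cs'.dropWhile p = x :: xs := by rw [← hrdef]; exact hx
        have h2 := pv_dropWhile_head_false p cs' x xs hx'
        rw [hp] at h2
        simpa using h2
      have hr : r.length ≤ n := by
        have := List.length_dropWhile_le p cs'
        have hc : cs'.length ≤ n := Nat.le_of_succ_le_succ (by simpa using h)
        rw [hrdef]; omega
      -- reduce A's side
      have hA : pvLoopA (c :: cs') none 0 =
          pvStepEmit (pvClassify c) 1 c ++ (pvEmitSeg (pvClassify c) 1 t ++ pvAltGo r) := by
        simp only [pvLoopA, reduceCtorEq, if_false]
        rw [← hsplit, pvLoopA_seg _ t ht 1 r, pvLoopA_reset r _ _ hd, ih r hr]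
      -- reduce B's side
      have hB : pvAltGo (c :: cs') =
          (if (pvClassify c).1 = "digit" then List.replicate (1 + t.length) ((pvClassify c).2.getD ' ')
           else if (pvClassify c).1 = "newline" then List.replicate (min (1 + t.length) 2) '\n'
           else if (pvClassify c).1 = "hspace" then [' ']
           else List.replicate (min (1 + t.length) 3) ((pvClassify c).2.getD ' ')) ++ pvAltGo r := by
        rw [pvAltGo]
      rw [hA, hB, ← List.append_assoc]
      congr 1
      -- now case on the class of c
      by_cases h1 : PySem.Chars.isdigit c
      · have hk : pvClassify c = ("digit", some c) := by simp [pvClassify, h1]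
        rw [hk] at ht ⊢
        simp only [pvStepEmit, pvEmitSeg_digit c t ht 1]
        simp only [reduceIte, Option.getD_some]
        rw [Nat.add_comm, List.replicate_succ]
        rfl
      · by_cases h2 : c = '\n'
        · have hk : pvClassify c = ("newline", (none : Option Char)) := by
            subst h2; decide
          rw [hk]
          simp only [pvStepEmit_newline, pvEmitSeg_newline t 1]
          simp only [String.reduceEq, reduceIte, Nat.reduceLeDiff]
          rw [show min (1 + t.length) 2 = min t.length (2 - 1) + 1 by omega,
            List.replicate_succ]
          rfl
        · by_cases h3 : PySem.Chars.isspace c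
          · have hk : pvClassify c = ("hspace", (none : Option Char)) := by
              simp [pvClassify, h1, h2, h3]
            rw [hk]
            simp only [pvStepEmit_hspace, pvEmitSeg_hspace t 1]
            simp
          · have hk : pvClassify c = ("char", some c) := by
              simp [pvClassify, h1, h2, h3]
            rw [hk] at ht ⊢
            simp only [pvStepEmit_char, pvEmitSeg_char c t ht 1]
            simp only [String.reduceEq, reduceIte, Nat.reduceLeDiff, Option.getD_some]
            rw [show min (1 + t.length) 3 = min t.length (3 - 1) + 1 by omega,
              List.replicate_succ]
            rfl

-- ===== VERDICT (by name: the statement is the Claim_ definition above) =====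
theorem collapse_repeated_chars_spec : Claim_equal_collapse_repeated_chars := by
  intro s _
  unfold Spec_collapse_repeated_chars collapse_repeated_chars collapse_repeated_chars_alt
  rw [pvFoldA_eq_loopA, List.nil_append, pvLoopA_eq_alt s.toList.length s.toList le_rfl]
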